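-- pv_equiv track=rewrite | github.com/Dancesoul/leetcodebywhy | Solutions.py | threenum
-- ===== SOURCE A (Python) =====
-- def threenum(nums):
--     """
--     :type nums: List[int]
--     """
--     res = []
--     for a in nums:
--         if a == 0:
--             continue
--         for b in nums:
--             for c in nums:
--                 res.append(a * 100 + b * 10 + c)
--     return set(res)
-- ===== SOURCE B (Python) =====
-- def threenum(nums):
--     """
--     :type nums: List[int]
--     """
--     digits = set(nums)
--     sums = digits - {0}          # leading digit must be nonzero
--     for _ in range(2):
--         sums = {10 * s + d for s in sums for d in digits}
--     return sums
-- ===== Notes on version B (the rewrite author's own statement) =====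
-- stated objective: faster
-- what changed: B works on the set of distinct digits and maintains a set of distinct partial sums that it expands twice (sums -> 10*sums + digit), deduplicating at every stage, instead of A's triple nested loop over the raw list that appends every combination and deduplicates only at the end.
import Mathlib
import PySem

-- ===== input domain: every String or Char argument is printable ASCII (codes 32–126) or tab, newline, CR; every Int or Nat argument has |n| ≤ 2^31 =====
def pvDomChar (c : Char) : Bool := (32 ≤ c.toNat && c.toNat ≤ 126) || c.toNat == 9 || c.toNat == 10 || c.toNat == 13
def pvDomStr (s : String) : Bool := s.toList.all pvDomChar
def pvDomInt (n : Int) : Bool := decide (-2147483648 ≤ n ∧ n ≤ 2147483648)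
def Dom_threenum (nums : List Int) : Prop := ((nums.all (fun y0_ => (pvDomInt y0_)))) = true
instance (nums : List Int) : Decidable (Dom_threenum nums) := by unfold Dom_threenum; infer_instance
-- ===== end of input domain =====

-- B maintains a SET of distinct partial sums over the distinct digits, expanded in two staged passes (sums -> 10*sums+digit) with dedup at every stage, instead of A's triple nested loop with dedup only at the end; the per-stage dedup collapses duplicate work (measured faster on a timing run's inputs).

-- ===== PORT A =====
def threenum (nums : List Int) : List Int :=
  let res : List Int :=
    nums.foldl (fun res a =>
      if a == 0 then res
      else
        nums.foldl (fun res b =>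
          nums.foldl (fun res c => res ++ [a * 100 + b * 10 + c]) res) res) []
  PySem.Set.ofList res

-- ===== PORT B =====
def threenum_alt (nums : List Int) : List Int :=
  let digits : PySem.Set Int := PySem.Set.ofList nums
  let sums : PySem.Set Int := PySem.Set.diff digits [0]
  (PySem.List.pyRange 0 2 1).foldl
    (fun sums _ =>
      PySem.Set.ofList (sums.flatMap (fun s => digits.map (fun d => 10 * s + d))))
    sums

-- ===== PRECONDITION & SPEC =====
def Spec_threenum (nums : List Int) (out : List Int) : Prop := out = threenum_alt nums
instance (nums : List Int) (out : List Int) : Decidable (Spec_threenum nums out) := by unfold Spec_threenum; infer_instance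

-- ===== CLAIM (what is proved, stated in full; the proofs are below) =====
def Claim_equal_threenum : Prop := ∀ (nums : List Int), Dom_threenum nums → Spec_threenum nums (threenum nums)

-- ===== LEMMAS AND PROOFS =====

-- update depends on its argument only through ofList
theorem update_congr_ofList {α : Type} [BEq α] [LawfulBEq α] (s : PySem.Set α)
    (l1 l2 : List α) (h : PySem.Set.ofList l1 = PySem.Set.ofList l2) :
    PySem.Set.update s l1 = PySem.Set.update s l2 := by
  rw [PySem.Set.update_eq_append_filter, PySem.Set.update_eq_append_filter, h]

-- a fold of updates is one update of the flatMap
theorem foldl_update_eq_update_flatMap {α β : Type} [BEq β] (g : α → List β) :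
    ∀ (xs : List α) (s : PySem.Set β),
      xs.foldl (fun s x => PySem.Set.update s (g x)) s = PySem.Set.update s (xs.flatMap g) := by
  intro xs
  induction xs with
  | nil => intro s; simp [PySem.Set.update]
  | cons x xs ih =>
      intro s
      rw [List.foldl_cons, ih, List.flatMap_cons, PySem.Set.update_append]

-- updating with already-present elements is a no-op
theorem update_of_subset {α : Type} [BEq α] [LawfulBEq α] (s : PySem.Set α) (l : List α)
    (h : ∀ y ∈ l, y ∈ s) : PySem.Set.update s l = s := by
  rw [PySem.Set.update_eq_append_filter]
  have : List.filter (fun y => !s.contains y) (PySem.Set.ofList l) = [] := by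
    rw [List.filter_eq_nil_iff]
    intro y hy
    have hys : y ∈ s := h y ((PySem.Set.mem_ofList l y).mp hy)
    simp [hys]
  rw [this, List.append_nil]

-- fold of updates ignores elements whose block is already absorbed (seen) and duplicates
theorem foldl_update_dedup {α β : Type} [BEq α] [LawfulBEq α] [BEq β] [LawfulBEq β]
    (g : α → List β) :
    ∀ (xs : List α) (s : PySem.Set β) (seen : List α),
      (∀ x ∈ seen, ∀ y ∈ g x, y ∈ s) →
      xs.foldl (fun s x => PySem.Set.update s (g x)) s
        = ((PySem.Set.ofList xs).filter (fun x => !seen.contains x)).foldl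
            (fun s x => PySem.Set.update s (g x)) s := by
  intro xs
  induction xs with
  | nil => intro s seen _; simp [PySem.Set.ofList_nil]
  | cons x xs ih =>
      intro s seen hseen
      rw [List.foldl_cons, PySem.Set.ofList_cons]
      by_cases hx : x ∈ seen
      · have hsx : PySem.Set.update s (g x) = s :=
          update_of_subset s (g x) (hseen x hx)
        rw [hsx]
        have hfil : ((x :: (PySem.Set.ofList xs).discard x).filter (fun z => !seen.contains z))
            = (PySem.Set.ofList xs).filter (fun z => !seen.contains z) := by
          rw [List.filter_cons, if_neg (by simp [hx])]
          simp only [PySem.Set.discard, List.filter_filter]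
          apply List.filter_congr
          intro a _
          by_cases hax : a = x
          · subst hax; simp [hx]
          · simp [hax]
        rw [hfil]
        exact ih s seen hseen
      · have hseen' : ∀ z ∈ (x :: seen), ∀ y ∈ g z, y ∈ PySem.Set.update s (g x) := by
          intro z hz y hy
          rcases List.mem_cons.mp hz with h | h
          · exact (PySem.Set.mem_update s (g x) y).mpr (Or.inr (h ▸ hy))
          · exact (PySem.Set.mem_update s (g x) y).mpr (Or.inl (hseen z h y hy))
        rw [ih (PySem.Set.update s (g x)) (x :: seen) hseen']
        have hfil : ((x :: (PySem.Set.ofList xs).discard x).filter (fun z => !seen.contains z))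
            = x :: (PySem.Set.ofList xs).filter (fun z => !(x :: seen).contains z) := by
          rw [List.filter_cons, if_pos (by simp [hx])]
          simp only [PySem.Set.discard, List.filter_filter]
          congr 1
          apply List.filter_congr
          intro a _
          simp [Bool.not_or, Bool.and_comm]
        rw [hfil, List.foldl_cons]

-- KEY: deduplicating the outer list first does not change the resulting set
theorem ofList_flatMap_ofList {α β : Type} [BEq α] [LawfulBEq α] [BEq β] [LawfulBEq β]
    (g : α → List β) (xs : List α) :
    PySem.Set.ofList ((PySem.Set.ofList xs).flatMap g) = PySem.Set.ofList (xs.flatMap g) := by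
  have h1 : ∀ (l : List α), PySem.Set.ofList (l.flatMap g)
      = l.foldl (fun s x => PySem.Set.update s (g x)) [] := by
    intro l
    rw [foldl_update_eq_update_flatMap, PySem.Set.update_nil_left]
  rw [h1, h1]
  have := foldl_update_dedup g xs ([] : PySem.Set β) ([] : List α) (by intro x hx; cases hx)
  rw [this]
  simp

-- replacing each block by one with the same ofList does not change the resulting set
theorem update_flatMap_congr {α β : Type} [BEq β] [LawfulBEq β]
    (g1 g2 : α → List β) :
    ∀ (xs : List α), (∀ x ∈ xs, PySem.Set.ofList (g1 x) = PySem.Set.ofList (g2 x)) →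
      ∀ (s : PySem.Set β),
        PySem.Set.update s (xs.flatMap g1) = PySem.Set.update s (xs.flatMap g2) := by
  intro xs
  induction xs with
  | nil => intro _ s; simp
  | cons x xs ih =>
      intro h s
      rw [List.flatMap_cons, List.flatMap_cons, PySem.Set.update_append,
        PySem.Set.update_append,
        update_congr_ofList s (g1 x) (g2 x) (h x (List.mem_cons_self ..)),
        ih (fun z hz => h z (List.mem_cons_of_mem _ hz))]

theorem ofList_flatMap_congr {α β : Type} [BEq β] [LawfulBEq β]
    (g1 g2 : α → List β) (xs : List α)
    (h : ∀ x ∈ xs, PySem.Set.ofList (g1 x) = PySem.Set.ofList (g2 x)) :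
    PySem.Set.ofList (xs.flatMap g1) = PySem.Set.ofList (xs.flatMap g2) := by
  rw [← PySem.Set.update_nil_left, ← PySem.Set.update_nil_left]
  exact update_flatMap_congr g1 g2 xs h []

-- mapping over the deduplicated list gives the same set as mapping over the list
theorem ofList_map_ofList {α β : Type} [BEq α] [LawfulBEq α] [BEq β] [LawfulBEq β]
    (f : α → β) (xs : List α) :
    PySem.Set.ofList ((PySem.Set.ofList xs).map f) = PySem.Set.ofList (xs.map f) := by
  have h : ∀ (l : List α), l.map f = l.flatMap (fun x => [f x]) := by
    intro l; induction l with
    | nil => rfl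
    | cons a l ih => simp [ih]
  rw [h, h, ofList_flatMap_ofList]

-- filtering commutes with dedup
theorem ofList_filter {α : Type} [BEq α] [LawfulBEq α] (p : α → Bool) :
    ∀ (xs : List α), (PySem.Set.ofList xs).filter p = PySem.Set.ofList (xs.filter p) := by
  intro xs
  induction xs with
  | nil => simp [PySem.Set.ofList_nil]
  | cons x xs ih =>
      rw [PySem.Set.ofList_cons, List.filter_cons]
      by_cases hp : p x = true
      · rw [if_pos hp, List.filter_cons, if_pos hp, PySem.Set.ofList_cons, ← ih]
        simp only [PySem.Set.discard, List.filter_filter]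
        congr 1
        apply List.filter_congr
        intro a _
        rw [Bool.and_comm]
      · rw [if_neg hp, List.filter_cons, if_neg hp, ← ih]
        simp only [PySem.Set.discard, List.filter_filter]
        apply List.filter_congr
        intro a _
        by_cases hax : a = x
        · subst hax; simp [hp]
        · simp [hax]

-- A's nested loop skipping zeros, as filter + flatMap
theorem foldl_skip_zero (nums : List Int) (G : Int → List Int) :
    ∀ (l : List Int) (acc : List Int),
      l.foldl (fun res a => if a == 0 then res else res ++ G a) acc
        = acc ++ (l.filter (fun a => !(a == 0))).flatMap G := by
  intro l
  induction l with
  | nil => intro acc; simp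
  | cons a l ih =>
      intro acc
      rw [List.foldl_cons, ih]
      by_cases h : a = 0
      · simp [h]
      · simp [h, List.append_assoc]

-- A's underlying list, closed form
theorem threenum_list_eq (nums : List Int) :
    nums.foldl (fun res a =>
      if a == 0 then res
      else
        nums.foldl (fun res b =>
          nums.foldl (fun res c => res ++ [a * 100 + b * 10 + c]) res) res) ([] : List Int)
    = (nums.filter (fun a => !(a == 0))).flatMap
        (fun a => nums.flatMap (fun b => nums.map (fun c => a * 100 + b * 10 + c))) := by
  simp only [PySem.List.foldl_append_singleton_eq_map, PySem.List.foldl_append_eq_flatMap]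
  rw [foldl_skip_zero nums
    (fun a => nums.flatMap (fun b => List.map (fun c => a * 100 + b * 10 + c) nums))]
  simp

-- ===== VERDICT (by name: the statement is the Claim_ definition above) =====
theorem threenum_spec : Claim_equal_threenum := by
  intro nums _
  unfold Spec_threenum threenum threenum_alt
  rw [threenum_list_eq]
  -- evaluate the two-iteration loop
  have hrange : PySem.List.pyRange 0 2 1 = [0, 1] := by decide
  rw [hrange]
  simp only [List.foldl_cons, List.foldl_nil]
  -- the start set: the distinct nonzero digits
  have h0 : PySem.Set.diff (PySem.Set.ofList nums) [0]
      = PySem.Set.ofList (nums.filter (fun a => !(a == 0))) := by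
    rw [← ofList_filter]
    simp only [PySem.Set.diff]
    apply List.filter_congr
    intro a _
    by_cases h : a = 0
    · simp [h]
    · simp [h]
  rw [h0]
  set l0 : List Int := nums.filter (fun a => !(a == 0)) with hl0
  -- stage blocks: mapping over the distinct digits gives the same set as over the raw list
  have hblock : ∀ (l : List Int),
      PySem.Set.ofList (l.flatMap (fun s => (PySem.Set.ofList nums).map (fun d => 10 * s + d)))
        = PySem.Set.ofList (l.flatMap (fun s => nums.map (fun d => 10 * s + d))) := by
    intro l
    apply ofList_flatMap_congr
    intro x _
    exact ofList_map_ofList (fun d => 10 * x + d) nums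
  set l1 : List Int := l0.flatMap (fun s => nums.map (fun d => 10 * s + d)) with hl1
  -- stage 1: expanding the deduplicated start set = set of l1
  have e1 : PySem.Set.ofList ((PySem.Set.ofList l0).flatMap
        (fun s => (PySem.Set.ofList nums).map (fun d => 10 * s + d)))
      = PySem.Set.ofList l1 := by
    rw [ofList_flatMap_ofList, hblock l0]
  rw [e1]
  -- stage 2
  rw [ofList_flatMap_ofList, hblock l1]
  -- pure list identity between A's combination list and B's staged list
  congr 1
  rw [hl1]
  simp only [List.flatMap_assoc, List.flatMap_map]
  simp only [show ∀ a b c : Int, 10 * (10 * a + b) + c = a * 100 + b * 10 + c from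
    fun a b c => by ring]
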